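-- pv_equiv track=rewrite | github.com/miliar/Code_Jam_Webscraper | solutions_python/solutions_year16_round4_nr1/148.py | make_prs_tree
-- ===== SOURCE A (Python) =====
-- winner_tree = {
--     "R": ["R", "S"],
--     "P": ["P", "R"],
--     "S": ["S", "P"]
-- }
--
-- def make_prs_tree(N, n_R, n_P, n_S):
--     solutions = []
--     ordered_solutions = []
--     for winner in ["R", "P", "S"]:
--         solutions.append(build_recursive_solution(winner, N))
--     for solution in solutions:
--         if solution.count("R") != n_R:
--             continue
--         if solution.count("P") != n_P:
--             continue
--         if solution.count("S") != n_S: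
--             continue
--         ordered_solutions.append(solution)
--     if not ordered_solutions:
--         return "IMPOSSIBLE"
--     return "".join(sorted(ordered_solutions)[0])
--
-- def build_recursive_solution(winner, depth):
--     if depth == 1:
--         return sorted(winner_tree[winner])
--     prevs = winner_tree[winner]
--     sol1 = build_recursive_solution(prevs[0], depth - 1)
--     sol2 = build_recursive_solution(prevs[1], depth - 1)
--     if sol1 > sol2:
--         return sol2 + sol1
--     return sol1 + sol2
-- ===== SOURCE B (Python) =====
-- winner_tree = {
--     "R": ["R", "S"],
--     "P": ["P", "R"],
--     "S": ["S", "P"]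
-- }
--
-- def _letter_counts(pair):
--     r = p = s = 0
--     for c in pair:
--         if c == "R":
--             r += 1
--         elif c == "P":
--             p += 1
--         else:
--             s += 1
--     return (r, p, s)
--
-- def _build(winner, depth):
--     if depth == 1:
--         a, b = winner_tree[winner]
--         return a + b if a <= b else b + a
--     s1 = _build(winner_tree[winner][0], depth - 1)
--     s2 = _build(winner_tree[winner][1], depth - 1)
--     return s1 + s2 if s1 <= s2 else s2 + s1
--
-- def make_prs_tree(N, n_R, n_P, n_S):
--     # analytic R/P/S counts of each winner's depth-N tree via a recurrence;
--     # a tree string is only built for winners whose counts already match.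
--     counts = {w: _letter_counts(winner_tree[w]) for w in ("R", "P", "S")}
--     for _ in range(N - 1):
--         counts = {
--             w: tuple(x + y for x, y in zip(counts[winner_tree[w][0]],
--                                            counts[winner_tree[w][1]]))
--             for w in ("R", "P", "S")
--         }
--     matches = [w for w in ("R", "P", "S") if counts[w] == (n_R, n_P, n_S)]
--     if not matches:
--         return "IMPOSSIBLE"
--     return min(_build(w, N) for w in matches)
-- ===== Notes on version B (the rewrite author's own statement) =====
-- stated objective: alternative
-- what changed: B replaces A's validation pass (build all three full 2^N-character tournament strings and scan-count each for R/P/S) with an analytic per-winner (r,p,s) count recurrence, then builds a tree string only for the count-matching winners and takes the minimum; intended as faster, but a timing run could not measure a ratio (A times out before B is stressed).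
import Mathlib
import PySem

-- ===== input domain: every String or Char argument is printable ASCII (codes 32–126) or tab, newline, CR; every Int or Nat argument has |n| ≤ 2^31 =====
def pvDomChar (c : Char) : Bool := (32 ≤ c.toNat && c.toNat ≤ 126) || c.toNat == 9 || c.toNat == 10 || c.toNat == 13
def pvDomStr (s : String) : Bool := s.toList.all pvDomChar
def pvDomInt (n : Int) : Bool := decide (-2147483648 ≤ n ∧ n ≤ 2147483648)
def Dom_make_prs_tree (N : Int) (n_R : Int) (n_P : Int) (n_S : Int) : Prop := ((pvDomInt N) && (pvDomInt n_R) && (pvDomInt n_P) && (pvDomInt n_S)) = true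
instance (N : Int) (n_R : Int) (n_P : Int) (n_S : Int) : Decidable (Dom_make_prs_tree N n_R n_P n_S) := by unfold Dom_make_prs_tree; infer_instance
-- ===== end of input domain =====

-- B replaces A's "build all three full tournament strings and scan-count each" validation by an
-- analytic per-winner (r,p,s) count recurrence, building a tree string only for count-matching winners
-- (objective: alternative; intended as faster — a timing run could not measure a ratio, A times out first).

-- ===== PORT A =====
-- winner_tree; Python's 1-char strings are ported as Char, a list of 1-char strings as List Char
-- (exact: list comparison / sorting / count / "".join coincide elementwise).
def pvWT (c : Char) : List Char :=
  if c = 'R' then ['R', 'S'] else if c = 'P' then ['P', 'R'] else ['S', 'P']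

-- build_recursive_solution, with the depth as Nat fuel (depth 0 is never reached from depth ≥ 1)
def pvBuildA (winner : Char) : Nat → List Char
  | 0 => []
  | 1 => PySem.List.sorted (pvWT winner) (fun x => x) false
  | d + 2 =>
    let prevs := pvWT winner
    let sol1 := pvBuildA (prevs.getD 0 ' ') (d + 1)
    let sol2 := pvBuildA (prevs.getD 1 ' ') (d + 1)
    if sol2 < sol1 then sol2 ++ sol1 else sol1 ++ sol2

def make_prs_tree (N : Int) (n_R : Int) (n_P : Int) (n_S : Int) : String :=
  let solutions := [pvBuildA 'R' N.toNat, pvBuildA 'P' N.toNat, pvBuildA 'S' N.toNat]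
  let ordered := solutions.filter (fun sol =>
    decide ((sol.count 'R' : Int) = n_R) && decide ((sol.count 'P' : Int) = n_P) &&
      decide ((sol.count 'S' : Int) = n_S))
  if ordered = [] then "IMPOSSIBLE"
  else String.mk ((PySem.List.sorted ordered (fun x => x) false).headD [])

-- ===== PORT B =====
-- _letter_counts (B's explicit r/p/s accumulator loop)
def pvLetterCounts (l : List Char) : Int × Int × Int :=
  l.foldl (fun acc c =>
    if c = 'R' then (acc.1 + 1, acc.2.1, acc.2.2)
    else if c = 'P' then (acc.1, acc.2.1 + 1, acc.2.2)
    else (acc.1, acc.2.1, acc.2.2 + 1)) (0, 0, 0)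

-- _build
def pvBuildB (winner : Char) : Nat → List Char
  | 0 => []
  | 1 =>
    let a := (pvWT winner).getD 0 ' '
    let b := (pvWT winner).getD 1 ' '
    if a ≤ b then [a, b] else [b, a]
  | d + 2 =>
    let s1 := pvBuildB ((pvWT winner).getD 0 ' ') (d + 1)
    let s2 := pvBuildB ((pvWT winner).getD 1 ' ') (d + 1)
    if s1 ≤ s2 then s1 ++ s2 else s2 ++ s1

-- the 3-key counts dict {R: _, P: _, S: _} as a triple of (r,p,s) triples
abbrev pvCState : Type := (Int × Int × Int) × (Int × Int × Int) × (Int × Int × Int)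

def pvGetW (c : pvCState) (w : Char) : Int × Int × Int :=
  if w = 'R' then c.1 else if w = 'P' then c.2.1 else c.2.2

-- tuple(x+y for x, y in zip(...)) on the two parent entries
def pvNewW (c : pvCState) (w : Char) : Int × Int × Int :=
  let u := pvGetW c ((pvWT w).getD 0 ' ')
  let v := pvGetW c ((pvWT w).getD 1 ' ')
  (u.1 + v.1, u.2.1 + v.2.1, u.2.2 + v.2.2)

def pvStep (c : pvCState) : pvCState := (pvNewW c 'R', pvNewW c 'P', pvNewW c 'S')

def pvInit : pvCState :=
  (pvLetterCounts (pvWT 'R'), pvLetterCounts (pvWT 'P'), pvLetterCounts (pvWT 'S'))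

def make_prs_tree_alt (N : Int) (n_R : Int) (n_P : Int) (n_S : Int) : String :=
  let counts := (PySem.List.pyRange 0 (N - 1) 1).foldl (fun c _ => pvStep c) pvInit
  let winners := (['R', 'P', 'S'].filter (fun w => decide (pvGetW counts w = (n_R, n_P, n_S))))
  if winners = [] then "IMPOSSIBLE"
  else String.mk ((PySem.List.min? (winners.map (fun w => pvBuildB w N.toNat)) (fun x => x)).getD [])

-- ===== PRECONDITION & SPEC =====
-- Pre_ excludes N ≤ 0, where A's build_recursive_solution recurses forever (RecursionError).
def Pre_make_prs_tree (N : Int) (n_R : Int) (n_P : Int) (n_S : Int) : Prop := 1 ≤ N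
instance (N : Int) (n_R : Int) (n_P : Int) (n_S : Int) : Decidable (Pre_make_prs_tree N n_R n_P n_S) := by
  unfold Pre_make_prs_tree; infer_instance

def pvWitness_make_prs_tree : Int × Int × Int × Int := (2, 1, 1, 2)

def Spec_make_prs_tree (N : Int) (n_R : Int) (n_P : Int) (n_S : Int) (out : String) : Prop := out = make_prs_tree_alt N n_R n_P n_S
instance (N : Int) (n_R : Int) (n_P : Int) (n_S : Int) (out : String) : Decidable (Spec_make_prs_tree N n_R n_P n_S out) := by unfold Spec_make_prs_tree; infer_instance

-- ===== CLAIM (what is proved, stated in full; the proofs are below) =====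
def Claim_equal_make_prs_tree : Prop := ∀ (N : Int) (n_R : Int) (n_P : Int) (n_S : Int), Dom_make_prs_tree N n_R n_P n_S → Pre_make_prs_tree N n_R n_P n_S → Spec_make_prs_tree N n_R n_P n_S (make_prs_tree N n_R n_P n_S)

-- ===== LEMMAS AND PROOFS =====

-- the two builders agree
lemma build_eq (w : Char) (d : Nat) : pvBuildA w d = pvBuildB w d := by
  induction d using Nat.strong_induction_on generalizing w with
  | _ d ih =>
    match d with
    | 0 => rfl
    | 1 =>
      unfold pvBuildA pvBuildB pvWT
      by_cases h1 : w = 'R' <;> by_cases h2 : w = 'P' <;> simp [h1, h2] <;> decide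
    | d + 2 =>
      simp only [pvBuildA, pvBuildB]
      rw [ih (d + 1) (by omega), ih (d + 1) (by omega)]
      by_cases h : pvBuildB ((pvWT w).getD 0 ' ') (d + 1) ≤ pvBuildB ((pvWT w).getD 1 ' ') (d + 1)
      · rw [if_neg (not_lt.mpr h), if_pos h]
      · rw [if_pos (not_le.mp h), if_neg h]

-- analytic triple of a list
def pvCnt (l : List Char) : Int × Int × Int := ((l.count 'R' : Int), (l.count 'P' : Int), (l.count 'S' : Int))

lemma cnt_append (l1 l2 : List Char) :
    pvCnt (l1 ++ l2) = ((pvCnt l1).1 + (pvCnt l2).1, (pvCnt l1).2.1 + (pvCnt l2).2.1, (pvCnt l1).2.2 + (pvCnt l2).2.2) := by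
  simp [pvCnt, List.count_append]

lemma cnt_build_succ (w : Char) (d : Nat) :
    pvCnt (pvBuildB w (d + 2)) =
      ((pvCnt (pvBuildB ((pvWT w).getD 0 ' ') (d+1))).1 + (pvCnt (pvBuildB ((pvWT w).getD 1 ' ') (d+1))).1,
       (pvCnt (pvBuildB ((pvWT w).getD 0 ' ') (d+1))).2.1 + (pvCnt (pvBuildB ((pvWT w).getD 1 ' ') (d+1))).2.1,
       (pvCnt (pvBuildB ((pvWT w).getD 0 ' ') (d+1))).2.2 + (pvCnt (pvBuildB ((pvWT w).getD 1 ' ') (d+1))).2.2) := by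
  simp only [pvBuildB]
  split
  · rw [cnt_append]
  · rw [cnt_append]; simp only [Prod.ext_iff]; refine ⟨by omega, by omega, by omega⟩

def pvTripleOf (d : Nat) : pvCState := (pvCnt (pvBuildB 'R' d), pvCnt (pvBuildB 'P' d), pvCnt (pvBuildB 'S' d))

lemma iterate_step (k : Nat) : pvStep^[k] pvInit = pvTripleOf (k + 1) := by
  induction k with
  | zero => decide
  | succ k ih =>
    rw [Function.iterate_succ_apply', ih]
    show pvStep (pvTripleOf (k+1)) = pvTripleOf (k+2)
    have hR := cnt_build_succ 'R' k
    have hP := cnt_build_succ 'P' k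
    have hS := cnt_build_succ 'S' k
    simp [pvWT, List.getD] at hR hP hS
    simp [pvTripleOf, pvStep, pvNewW, pvGetW, pvWT, List.getD]
    simp [hR, hP, hS]

lemma foldl_const_step (l : List Int) (c : pvCState) :
    l.foldl (fun c _ => pvStep c) c = pvStep^[l.length] c := by
  induction l generalizing c with
  | nil => rfl
  | cons x t ih => simp [List.foldl, ih, Function.iterate_succ_apply]

lemma sorted_head_eq_min (l : List (List Char)) (h : l ≠ []) :
    (PySem.List.sorted l (fun x => x) false).headD [] = (PySem.List.min? l (fun x => x)).getD [] := by
  have hD : (inferInstance : DecidableLT (List Char)) = List.instLinearOrder.toDecidableLT :=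
    Subsingleton.elim _ _
  rw [show (PySem.List.sorted l (fun x : List Char => x) false)
      = @PySem.List.sorted _ _ List.instLinearOrder.toLT List.instLinearOrder.toDecidableLT l (fun x => x) false by rw [← hD]]
  rw [show (PySem.List.min? l (fun x : List Char => x))
      = @PySem.List.min? _ _ List.instLinearOrder.toLT List.instLinearOrder.toDecidableLT l (fun x => x) by rw [← hD]]
  obtain ⟨m, t, hs⟩ : ∃ m t, @PySem.List.sorted _ _ List.instLinearOrder.toLT List.instLinearOrder.toDecidableLT l (fun x => x) false = m :: t := by
    cases hsl : @PySem.List.sorted _ _ List.instLinearOrder.toLT List.instLinearOrder.toDecidableLT l (fun x => x) false with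
    | nil => exact absurd ((@PySem.List.sorted_eq_nil_iff _ _ List.instLinearOrder.toLT List.instLinearOrder.toDecidableLT l (fun x => x) false).mp hsl) h
    | cons m t => exact ⟨m, t, rfl⟩
  obtain ⟨m', hm'⟩ : ∃ m', @PySem.List.min? _ _ List.instLinearOrder.toLT List.instLinearOrder.toDecidableLT l (fun x => x) = some m' := by
    cases hmin : @PySem.List.min? _ _ List.instLinearOrder.toLT List.instLinearOrder.toDecidableLT l (fun x => x) with
    | none => exact absurd ((@PySem.List.min?_eq_none_iff _ _ List.instLinearOrder.toLT List.instLinearOrder.toDecidableLT l (fun x => x)).mp hmin) h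
    | some m' => exact ⟨m', rfl⟩
  rw [hs, hm']
  have hmem : m ∈ l := (@PySem.List.sorted_perm _ _ List.instLinearOrder.toLT List.instLinearOrder.toDecidableLT l (fun x => x) false).mem_iff.mp (by rw [hs]; exact List.mem_cons_self)
  have hmem' : m' ∈ l := @PySem.List.min?_mem _ _ List.instLinearOrder.toLT List.instLinearOrder.toDecidableLT l (fun x => x) m' hm'
  have h1 := PySem.List.key_head_sorted_le l (fun x => x) hs m' hmem'
  have h2 := PySem.List.min?_isMin hm' m hmem
  exact le_antisymm h1 h2

theorem make_prs_tree_spec : Claim_equal_make_prs_tree := by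
  intro N n_R n_P n_S _ hpre
  unfold Pre_make_prs_tree at hpre
  unfold Spec_make_prs_tree
  simp only [make_prs_tree, make_prs_tree_alt]
  have hcounts : (PySem.List.pyRange 0 (N - 1) 1).foldl (fun c _ => pvStep c) pvInit = pvTripleOf N.toNat := by
    rw [foldl_const_step, PySem.List.length_pyRange_one, iterate_step]
    congr 1
    omega
  rw [hcounts, build_eq, build_eq, build_eq]
  have hq : ∀ w : Char,
      (decide (((pvBuildB w N.toNat).count 'R' : Int) = n_R) &&
        decide (((pvBuildB w N.toNat).count 'P' : Int) = n_P) &&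
        decide (((pvBuildB w N.toNat).count 'S' : Int) = n_S))
      = decide (pvCnt (pvBuildB w N.toNat) = (n_R, n_P, n_S)) := by
    intro w
    simp [pvCnt, Prod.ext_iff, Bool.and_assoc]
  have hpR : decide (pvGetW (pvTripleOf N.toNat) 'R' = (n_R, n_P, n_S))
      = decide (pvCnt (pvBuildB 'R' N.toNat) = (n_R, n_P, n_S)) := by simp [pvGetW, pvTripleOf]
  have hpP : decide (pvGetW (pvTripleOf N.toNat) 'P' = (n_R, n_P, n_S))
      = decide (pvCnt (pvBuildB 'P' N.toNat) = (n_R, n_P, n_S)) := by simp [pvGetW, pvTripleOf]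
  have hpS : decide (pvGetW (pvTripleOf N.toNat) 'S' = (n_R, n_P, n_S))
      = decide (pvCnt (pvBuildB 'S' N.toNat) = (n_R, n_P, n_S)) := by simp [pvGetW, pvTripleOf]
  have hfilter :
      ([pvBuildB 'R' N.toNat, pvBuildB 'P' N.toNat, pvBuildB 'S' N.toNat].filter (fun sol =>
          decide ((sol.count 'R' : Int) = n_R) && decide ((sol.count 'P' : Int) = n_P) &&
            decide ((sol.count 'S' : Int) = n_S)))
      = ((['R', 'P', 'S'].filter (fun w => decide (pvGetW (pvTripleOf N.toNat) w = (n_R, n_P, n_S)))).map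
          (fun w => pvBuildB w N.toNat)) := by
    simp only [List.filter_cons, List.filter_nil, hpR, hpP, hpS, hq]
    cases hdR : decide (pvCnt (pvBuildB 'R' N.toNat) = (n_R, n_P, n_S)) <;>
      cases hdP : decide (pvCnt (pvBuildB 'P' N.toNat) = (n_R, n_P, n_S)) <;>
      cases hdS : decide (pvCnt (pvBuildB 'S' N.toNat) = (n_R, n_P, n_S)) <;> simp
  rw [hfilter]
  by_cases hemp : (['R', 'P', 'S'].filter (fun w => decide (pvGetW (pvTripleOf N.toNat) w = (n_R, n_P, n_S)))) = []
  · simp [hemp]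
  · rw [if_neg (by simp [hemp]), if_neg hemp]
    exact congrArg String.mk (sorted_head_eq_min _ (by simp [hemp]))
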